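-- pv_equiv track=rewrite | github.com/Unvire/Quest3-beatsaber-playlist-manager | beatSaberPlaylist.py | _makeSelectionGroups
-- ===== SOURCE A (Python) =====
-- def _makeSelectionGroups(selectedIndexesList:list[int]) -> list[list[int]]:
--     selectedIndexesList = sorted(selectedIndexesList)
--     if not selectedIndexesList:
--         return [[]]
--
--     firstItem = selectedIndexesList.pop(0)
--     group = [firstItem]
--     groups = []
--     for index in selectedIndexesList:
--         if group[-1] == index - 1:
--             group.append(index)
--         else:
--             groups.append(group)
--             group = [index]
--
--     groups.append(group)
--     return groups
-- ===== SOURCE B (Python) =====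
-- def _makeSelectionGroups(selectedIndexesList: list[int]) -> list[list[int]]:
--     s = sorted(selectedIndexesList)
--     bounds = [0] + [i for i in range(1, len(s)) if s[i] != s[i - 1] + 1] + [len(s)]
--     return [s[a:b] for a, b in zip(bounds, bounds[1:])]
-- ===== Notes on version B (the rewrite author's own statement) =====
-- stated objective: alternative
-- what changed: A grows each group element by element in a single accumulator pass with flush-at-break; B works in stages: it first computes the list of break indices over the sorted list, then forms bounds and materializes every group as a slice s[a:b] between adjacent bounds, never growing a group incrementally.
import Mathlib
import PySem

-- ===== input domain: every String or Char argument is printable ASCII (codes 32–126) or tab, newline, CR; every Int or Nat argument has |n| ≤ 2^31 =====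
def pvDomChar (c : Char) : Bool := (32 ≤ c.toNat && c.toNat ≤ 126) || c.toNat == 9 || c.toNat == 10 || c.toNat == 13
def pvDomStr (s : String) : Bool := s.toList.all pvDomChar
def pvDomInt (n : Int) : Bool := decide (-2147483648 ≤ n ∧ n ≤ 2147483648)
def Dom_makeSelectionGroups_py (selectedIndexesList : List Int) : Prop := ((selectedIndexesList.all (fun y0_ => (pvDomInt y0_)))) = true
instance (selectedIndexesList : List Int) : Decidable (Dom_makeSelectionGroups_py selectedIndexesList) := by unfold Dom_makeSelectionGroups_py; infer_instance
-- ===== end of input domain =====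

-- A grows each group element by element in a single accumulator pass flushed at breaks;
-- B first computes the break indices of the sorted list and then materializes each group
-- as a slice between adjacent bounds. Alternative decomposition; return values proved equal.

-- ===== PORT A =====
-- loop body of A: 'if group[-1] == index - 1: group.append(index) else: groups.append(group); group = [index]'
def pvAStep (st : List Int × List (List Int)) (index : Int) : List Int × List (List Int) :=
  if PySem.List.pyGet? st.1 (-1) == some (index - 1) then (st.1 ++ [index], st.2)
  else ([index], st.2 ++ [st.1])

def makeSelectionGroups_py (selectedIndexesList : List Int) : List (List Int) :=
  match PySem.List.sorted selectedIndexesList (fun x => x) false with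
  | [] => [[]]                                  -- 'if not selectedIndexesList: return [[]]'
  | firstItem :: rest =>                        -- 'firstItem = selectedIndexesList.pop(0)'
      let st := rest.foldl pvAStep ([firstItem], [])
      st.2 ++ [st.1]                            -- 'groups.append(group); return groups'

-- ===== PORT B =====
-- '[i for i in range(1, len(s)) if s[i] != s[i - 1] + 1]'  (i is in range, so pyGet? is some on both sides)
def pvBreaks (s : List Int) : List Int :=
  (PySem.List.pyRange 1 (s.length : Int) 1).filter
    (fun i => !(PySem.List.pyGet? s i == (PySem.List.pyGet? s (i - 1)).map (· + 1)))

def makeSelectionGroups_py_alt (selectedIndexesList : List Int) : List (List Int) :=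
  let s := PySem.List.sorted selectedIndexesList (fun x => x) false
  let bounds : List Int := 0 :: pvBreaks s ++ [(s.length : Int)]   -- '[0] + breaks + [len(s)]'
  (bounds.zip bounds.tail).map (fun p => PySem.List.slice s (some p.1) (some p.2))  -- '[s[a:b] for a, b in zip(bounds, bounds[1:])]'

-- ===== PRECONDITION & SPEC =====
def Spec_makeSelectionGroups_py (selectedIndexesList : List Int) (out : List (List Int)) : Prop := out = makeSelectionGroups_py_alt selectedIndexesList
instance (selectedIndexesList : List Int) (out : List (List Int)) : Decidable (Spec_makeSelectionGroups_py selectedIndexesList out) := by unfold Spec_makeSelectionGroups_py; infer_instance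

-- ===== CLAIM (what is proved, stated in full; the proofs are below) =====
def Claim_equal_makeSelectionGroups_py : Prop := ∀ (selectedIndexesList : List Int), Dom_makeSelectionGroups_py selectedIndexesList → Spec_makeSelectionGroups_py selectedIndexesList (makeSelectionGroups_py selectedIndexesList)

-- ===== LEMMAS AND PROOFS =====

-- reference grouping of a nonempty list into maximal runs where the next element is prev+1
def pvG : List Int → List (List Int)
  | [] => []
  | [x] => [[x]]
  | x :: y :: t =>
      if x + 1 = y then
        match pvG (y :: t) with
        | g :: gs => (x :: g) :: gs
        | [] => [[x]]
      else [x] :: pvG (y :: t)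

lemma pvG_head (y : Int) (t : List Int) : ∃ u tl, pvG (y :: t) = (y :: u) :: tl := by
  induction t generalizing y with
  | nil => exact ⟨[], [], rfl⟩
  | cons z t ih =>
      obtain ⟨u, tl, h⟩ := ih z
      by_cases hc : y + 1 = z
      · exact ⟨z :: u, tl, by simp [pvG, hc, h]⟩
      · exact ⟨[], pvG (z :: t), by simp [pvG, hc]⟩

-- replace the head of the first group (which begins with the last element of g) by g
def pvAttach (g : List Int) : List (List Int) → List (List Int)
  | h :: tl => (g ++ h.tail) :: tl
  | [] => [g]

lemma pvA_fold (t : List Int) : ∀ (g : List Int) (x : Int) (gs : List (List Int)),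
    (t.foldl pvAStep (g ++ [x], gs)).2 ++ [(t.foldl pvAStep (g ++ [x], gs)).1]
      = gs ++ pvAttach (g ++ [x]) (pvG (x :: t)) := by
  induction t with
  | nil => intro g x gs; simp [pvG, pvAttach]
  | cons y t ih =>
      intro g x gs
      have hlast : PySem.List.pyGet? (g ++ [x]) (-1) = some x :=
        PySem.List.pyGet?_neg_one_append_singleton g x
      by_cases hc : x + 1 = y
      · have hstep : pvAStep (g ++ [x], gs) y = ((g ++ [x]) ++ [y], gs) := by
          simp only [pvAStep, hlast]
          rw [if_pos (by simp only [beq_iff_eq, Option.some.injEq]; omega)]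
        obtain ⟨u, tl, hG⟩ := pvG_head y t
        have h1 : pvG (x :: y :: t) = (x :: y :: u) :: tl := by
          simp [pvG, hc, hG]
        simp only [List.foldl_cons, hstep]
        rw [ih (g ++ [x]) y gs, h1, hG]
        simp [pvAttach]
      · have hstep : pvAStep (g ++ [x], gs) y = ([] ++ [y], gs ++ [g ++ [x]]) := by
          simp only [pvAStep, hlast]
          rw [if_neg (by simp only [beq_iff_eq, Option.some.injEq]; omega)]
          rfl
        have h1 : pvG (x :: y :: t) = [x] :: pvG (y :: t) := by
          simp [pvG, hc]
        obtain ⟨u, tl, hG⟩ := pvG_head y t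
        simp only [List.foldl_cons, hstep]
        rw [ih [] y (gs ++ [g ++ [x]]), h1, hG]
        simp [pvAttach]

-- A computes pvG on the sorted list (nonempty case)
lemma pvA_eq_pvG (x : Int) (t : List Int) :
    (t.foldl pvAStep ([x], [])).2 ++ [(t.foldl pvAStep ([x], [])).1] = pvG (x :: t) := by
  have := pvA_fold t [] x []
  obtain ⟨u, tl, hG⟩ := pvG_head x t
  simpa [hG, pvAttach] using this

-- === B side ===

def pvPairs (l : List Int) : List (Int × Int) := l.zip l.tail

lemma pvPairs_cons_cons (a b : Int) (r : List Int) :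
    pvPairs (a :: b :: r) = (a, b) :: pvPairs (b :: r) := rfl

-- the break-index list of x :: s' in terms of that of s'
lemma pvRange_map_add_one (a b : Int) :
    (PySem.List.pyRange a b 1).map (· + 1) = PySem.List.pyRange (a + 1) (b + 1) 1 := by
  rw [PySem.List.pyRange_one, PySem.List.pyRange_one, List.map_map]
  have h : (b + 1 - (a + 1)).toNat = (b - a).toNat := by omega
  rw [h]
  exact List.map_congr_left (fun k _ => by simp; ring)

-- the break-index list of x :: s' in terms of that of s'
lemma pvBreaks_cons (x y : Int) (t : List Int) :
    pvBreaks (x :: y :: t)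
      = (if x + 1 = y then ([] : List Int) else [1]) ++ (pvBreaks (y :: t)).map (· + 1) := by
  have hL1 : (1 : Int) ≤ ((y :: t).length : Int) := by simp
  have hlen : ((x :: y :: t).length : Int) = ((y :: t).length : Int) + 1 := by
    simp
  have hsplit : PySem.List.pyRange 1 ((x :: y :: t).length : Int) 1
      = 1 :: (PySem.List.pyRange 1 ((y :: t).length : Int) 1).map (· + 1) := by
    rw [hlen, PySem.List.pyRange_one_cons (by omega), pvRange_map_add_one]
  unfold pvBreaks
  rw [hsplit, List.filter_cons]
  have e1 : PySem.List.pyGet? (x :: y :: t) 1 = some y := by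
    rw [PySem.List.pyGet?_of_nonneg _ (by norm_num)]; norm_num
  have e0 : PySem.List.pyGet? (x :: y :: t) (1 - 1) = some x := by
    norm_num [PySem.List.pyGet?_zero_cons]
  have hmap : ((PySem.List.pyRange 1 ((y :: t).length : Int) 1).map (· + 1)).filter
        (fun i => !(PySem.List.pyGet? (x :: y :: t) i
            == (PySem.List.pyGet? (x :: y :: t) (i - 1)).map (· + 1)))
      = ((PySem.List.pyRange 1 ((y :: t).length : Int) 1).filter
        (fun i => !(PySem.List.pyGet? (y :: t) i
            == (PySem.List.pyGet? (y :: t) (i - 1)).map (· + 1)))).map (· + 1) := by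
    rw [List.filter_map]
    congr 1
    apply List.filter_congr
    intro i hi
    have hib : 1 ≤ i := ((PySem.List.mem_pyRange_one).1 hi).1
    have e2 : PySem.List.pyGet? (x :: y :: t) (i + 1) = PySem.List.pyGet? (y :: t) i := by
      rw [PySem.List.pyGet?_of_nonneg _ (by omega), PySem.List.pyGet?_of_nonneg _ (by omega)]
      have h : (i + 1).toNat = i.toNat + 1 := by omega
      rw [h]; rfl
    have e3 : PySem.List.pyGet? (x :: y :: t) (i + 1 - 1) = PySem.List.pyGet? (y :: t) (i - 1) := by
      rw [PySem.List.pyGet?_of_nonneg _ (by omega), PySem.List.pyGet?_of_nonneg _ (by omega)]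
      have h : (i + 1 - 1).toNat = (i - 1).toNat + 1 := by omega
      rw [h]; rfl
    simp only [Function.comp, e2, e3]
  by_cases hc : x + 1 = y
  · rw [if_neg (by simp; omega), hmap, if_pos hc]
    simp
  · rw [if_pos (by simp; omega), hmap, if_neg hc]
    rfl

-- shifting every bound by one drops the head element of the list being sliced
lemma pvShift (x : Int) (s' : List Int) : ∀ (R : List Int) (c : Int), 0 ≤ c → (∀ b ∈ R, 0 ≤ b) →
    (pvPairs ((c + 1) :: R.map (· + 1))).map
        (fun p => PySem.List.slice (x :: s') (some p.1) (some p.2))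
      = (pvPairs (c :: R)).map (fun p => PySem.List.slice s' (some p.1) (some p.2)) := by
  intro R
  induction R with
  | nil => intro c _ _; rfl
  | cons d R ih =>
      intro c hc hR
      have hd : 0 ≤ d := hR d (by simp)
      have hslice : PySem.List.slice (x :: s') (some (c + 1)) (some (d + 1))
          = PySem.List.slice s' (some c) (some d) := by
        rw [PySem.List.slice_toNat _ (by omega) (by omega),
            PySem.List.slice_toNat _ hc hd]
        have h1 : (c + 1).toNat = c.toNat + 1 := by omega
        have h2 : (d + 1).toNat = d.toNat + 1 := by omega
        rw [h1, h2]
        simp [List.drop_succ_cons]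
      simp only [List.map_cons, pvPairs_cons_cons, List.map_cons, hslice]
      rw [ih d hd (fun b hb => hR b (by simp [hb]))]

-- a leading slice s[0:c+1] of x :: s' is x followed by s'[0:c]
lemma pvHeadSlice (x : Int) (s' : List Int) (c : Int) (hc : 0 ≤ c) :
    PySem.List.slice (x :: s') (some 0) (some (c + 1)) = x :: PySem.List.slice s' (some 0) (some c) := by
  rw [PySem.List.slice_toNat _ le_rfl (by omega), PySem.List.slice_toNat _ le_rfl hc]
  have h2 : (c + 1).toNat = c.toNat + 1 := by omega
  simp [h2]

-- the slice-between-bounds computation on any list (what B does after sorting)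
def pvSliceGroups (s : List Int) : List (List Int) :=
  ((0 :: pvBreaks s ++ [(s.length : Int)]).zip (0 :: pvBreaks s ++ [(s.length : Int)]).tail).map
    (fun p => PySem.List.slice s (some p.1) (some p.2))

lemma pvBreaks_nonneg (s : List Int) : ∀ b ∈ pvBreaks s, 0 ≤ b := by
  intro b hb
  unfold pvBreaks at hb
  have := (PySem.List.mem_pyRange_one).1 (List.mem_of_mem_filter hb)
  omega

lemma pvB_eq_pvG (s : List Int) (hs : s ≠ []) : pvSliceGroups s = pvG s := by
  induction s with
  | nil => exact absurd rfl hs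
  | cons x t ih =>
      cases t with
      | nil =>
          have hb : pvBreaks [x] = [] := by
            unfold pvBreaks
            have h1 : ((([x] : List Int)).length : Int) = 1 := by simp
            rw [h1, PySem.List.pyRange_one_eq_nil le_rfl]
            rfl
          have hx : PySem.List.slice [x] (some 0) (some (([x] : List Int).length : Int)) = [x] := by
            rw [PySem.List.slice_toNat _ le_rfl (by simp)]
            rfl
          unfold pvSliceGroups
          rw [hb]
          simpa [pvG] using hx
      | cons y t' =>
          have hIH : pvSliceGroups (y :: t') = pvG (y :: t') := ih (by simp)
          obtain ⟨c, R, hcc⟩ : ∃ c R,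
              pvBreaks (y :: t') ++ [((y :: t').length : Int)] = c :: R := by
            cases h : pvBreaks (y :: t') with
            | nil => exact ⟨((y :: t').length : Int), [], by simp⟩
            | cons a l => exact ⟨a, l ++ [((y :: t').length : Int)], by simp⟩
          have hBnonneg : ∀ b ∈ (c :: R), 0 ≤ b := by
            intro b hb
            rw [← hcc] at hb
            rcases List.mem_append.1 hb with h | h
            · exact pvBreaks_nonneg _ b h
            · simp at h; omega
          have hc0 : 0 ≤ c := hBnonneg c (by simp)
          have hR0 : ∀ b ∈ R, 0 ≤ b := fun b hb => hBnonneg b (by simp [hb])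
          have hlen : ((x :: y :: t').length : Int) = ((y :: t').length : Int) + 1 := by
            simp
          have hIH' : pvSliceGroups (y :: t')
              = (pvPairs (0 :: c :: R)).map
                  (fun p => PySem.List.slice (y :: t') (some p.1) (some p.2)) := by
            unfold pvSliceGroups pvPairs
            rw [List.cons_append, hcc]
          have hmapcc : (pvBreaks (y :: t')).map (· + 1) ++ [((y :: t').length : Int) + 1]
              = (c + 1) :: R.map (· + 1) := by
            have h := congrArg (List.map (· + 1)) hcc
            simpa using h
          by_cases hcase : x + 1 = y
          · -- no break at position 1: first group of the tail gains x in front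
            have hbs : (0 :: pvBreaks (x :: y :: t')) ++ [((x :: y :: t').length : Int)]
                = 0 :: (c + 1) :: R.map (· + 1) := by
              rw [List.cons_append, pvBreaks_cons, if_pos hcase, hlen]
              simp only [List.nil_append]
              rw [hmapcc]
            have hmain : pvSliceGroups (x :: y :: t')
                = (x :: PySem.List.slice (y :: t') (some 0) (some c))
                  :: (pvPairs (c :: R)).map
                      (fun p => PySem.List.slice (y :: t') (some p.1) (some p.2)) := by
              unfold pvSliceGroups
              rw [hbs]
              rw [show ((0 :: (c + 1) :: R.map (· + 1)).zip (0 :: (c + 1) :: R.map (· + 1)).tail)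
                  = pvPairs (0 :: (c + 1) :: R.map (· + 1)) from rfl]
              rw [pvPairs_cons_cons, List.map_cons]
              rw [show (((0 : Int), c + 1)).1 = 0 from rfl, show (((0 : Int), c + 1)).2 = c + 1 from rfl]
              rw [pvHeadSlice x (y :: t') c hc0, pvShift x (y :: t') R c hc0 hR0]
            obtain ⟨u, tl, hG⟩ := pvG_head y t'
            have htail : pvG (x :: y :: t') = (x :: y :: u) :: tl := by
              simp [pvG, hcase, hG]
            have hfirst : PySem.List.slice (y :: t') (some 0) (some c) = y :: u ∧
                (pvPairs (c :: R)).map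
                    (fun p => PySem.List.slice (y :: t') (some p.1) (some p.2)) = tl := by
              have h := hIH'.symm.trans (hIH.trans hG)
              rw [pvPairs_cons_cons, List.map_cons] at h
              exact ⟨by injection h, by injection h⟩
            rw [hmain, htail, hfirst.1, hfirst.2]
          · -- break at position 1: [x] becomes its own group
            have hbs : (0 :: pvBreaks (x :: y :: t')) ++ [((x :: y :: t').length : Int)]
                = 0 :: 1 :: (c + 1) :: R.map (· + 1) := by
              rw [List.cons_append, pvBreaks_cons, if_neg hcase, hlen]
              simp only [List.cons_append, List.nil_append]
              rw [hmapcc]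
            have hshift := pvShift x (y :: t') (c :: R) 0 le_rfl hBnonneg
            rw [List.map_cons, zero_add] at hshift
            have hmain : pvSliceGroups (x :: y :: t')
                = PySem.List.slice (x :: y :: t') (some 0) (some 1) :: pvSliceGroups (y :: t') := by
              unfold pvSliceGroups
              rw [hbs]
              rw [show ((0 :: 1 :: (c + 1) :: R.map (· + 1)).zip
                    (0 :: 1 :: (c + 1) :: R.map (· + 1)).tail)
                  = pvPairs (0 :: 1 :: (c + 1) :: R.map (· + 1)) from rfl]
              rw [pvPairs_cons_cons, List.map_cons]
              rw [show (((0 : Int), (1 : Int))).1 = 0 from rfl,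
                  show (((0 : Int), (1 : Int))).2 = 1 from rfl]
              rw [hshift, List.cons_append, hcc]
              rfl
            have hx1 : PySem.List.slice (x :: y :: t') (some 0) (some 1) = [x] := by
              rw [PySem.List.slice_toNat _ le_rfl (by omega)]
              rfl
            rw [hmain, hx1, hIH]
            simp [pvG, hcase]

-- ===== VERDICT (by name: the statement is the Claim_ definition above) =====
theorem makeSelectionGroups_py_spec : Claim_equal_makeSelectionGroups_py := by
  intro l _
  unfold Spec_makeSelectionGroups_py makeSelectionGroups_py makeSelectionGroups_py_alt
  cases h : PySem.List.sorted l (fun x => x) false with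
  | nil =>
      unfold pvBreaks
      simp [PySem.List.pyRange_one_eq_nil, PySem.List.slice_toNat _ le_rfl le_rfl]
  | cons first rest =>
      dsimp only
      rw [pvA_eq_pvG first rest, ← pvB_eq_pvG (first :: rest) (by simp)]
      rfl
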